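-- pv_equiv track=rewrite | github.com/qigang47/pm15minv2 | src/pm15min/data/sources/chainlink_rpc.py | _winner_index_from_payouts
-- ===== SOURCE A (Python) =====
-- def _winner_index_from_payouts(payouts: list[int]) -> int | None:
--     if not payouts:
--         return None
--     best = max(payouts)
--     if best <= 0:
--         return None
--     winners = [idx for idx, value in enumerate(payouts) if int(value) == int(best)]
--     return int(winners[0]) if len(winners) == 1 else None
-- ===== SOURCE B (Python) =====
-- def _winner_index_from_payouts(payouts: list[int]) -> int | None:
--     best = None
--     best_idx = -1
--     count = 0
--     for idx, value in enumerate(payouts):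
--         if best is None or value > best:
--             best, best_idx, count = value, idx, 1
--         elif value == best:
--             count += 1
--     if best is None or best <= 0:
--         return None
--     return best_idx if count == 1 else None
-- ===== Notes on version B (the rewrite author's own statement) =====
-- stated objective: alternative
-- what changed: Single pass maintaining (best value, first index of best, tie count) replaces max() followed by a filter over enumerate and an index lookup.
import Mathlib
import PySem

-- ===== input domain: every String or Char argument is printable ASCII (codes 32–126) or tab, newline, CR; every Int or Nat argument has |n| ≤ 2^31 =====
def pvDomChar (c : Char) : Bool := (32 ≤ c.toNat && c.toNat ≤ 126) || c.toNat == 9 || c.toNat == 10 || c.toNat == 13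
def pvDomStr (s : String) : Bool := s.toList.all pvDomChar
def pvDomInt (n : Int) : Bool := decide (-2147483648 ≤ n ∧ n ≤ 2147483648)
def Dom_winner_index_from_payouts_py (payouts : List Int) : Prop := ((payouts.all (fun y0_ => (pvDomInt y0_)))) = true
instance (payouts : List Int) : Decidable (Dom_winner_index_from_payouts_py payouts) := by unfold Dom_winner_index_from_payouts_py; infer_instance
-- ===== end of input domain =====

-- B replaces the max-then-filter with one pass keeping (best, first index of best, tie count); alternative decomposition, same cost.

-- ===== PORT A =====
def winner_index_from_payouts_py (payouts : List Int) : Option Int :=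
  if payouts = [] then none
  else
    match PySem.List.max? payouts (fun x => x) with
    | none => none
    | some best =>
      if best ≤ 0 then none
      else
        let winners := ((PySem.List.enumerate payouts 0).filter (fun p => p.2 == best)).map (fun p => p.1)
        if winners.length == 1 then PySem.List.pyGet? winners 0 else none

-- ===== PORT B =====
def pvAltStep (st : Option Int × Int × Int) (p : Int × Int) : Option Int × Int × Int :=
  match st.1 with
  | none => (some p.2, p.1, 1)
  | some b =>
    if p.2 > b then (some p.2, p.1, 1)
    else if p.2 == b then (st.1, st.2.1, st.2.2 + 1)
    else st

def winner_index_from_payouts_py_alt (payouts : List Int) : Option Int :=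
  let st := (PySem.List.enumerate payouts 0).foldl pvAltStep (none, -1, 0)
  match st.1 with
  | none => none
  | some b =>
    if b ≤ 0 then none
    else if st.2.2 == 1 then some st.2.1 else none

-- ===== PRECONDITION & SPEC =====
def Spec_winner_index_from_payouts_py (payouts : List Int) (out : Option Int) : Prop := out = winner_index_from_payouts_py_alt payouts
instance (payouts : List Int) (out : Option Int) : Decidable (Spec_winner_index_from_payouts_py payouts out) := by unfold Spec_winner_index_from_payouts_py; infer_instance

-- ===== CLAIM (what is proved, stated in full; the proofs are below) =====
def Claim_equal_winner_index_from_payouts_py : Prop := ∀ (payouts : List Int), Dom_winner_index_from_payouts_py payouts → Spec_winner_index_from_payouts_py payouts (winner_index_from_payouts_py payouts)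

-- ===== LEMMAS AND PROOFS =====

def pvWinners (l : List Int) (b : Int) : List Int :=
  ((PySem.List.enumerate l 0).filter (fun p => p.2 == b)).map (fun p => p.1)

lemma pvMax_append (t : List Int) (ht : t ≠ []) (x b : Int)
    (h : PySem.List.max? t (fun y => y) = some b) :
    PySem.List.max? (t ++ [x]) (fun y => y) = some (max b x) := by
  obtain ⟨h0, t', rfl⟩ : ∃ h0 t', t = h0 :: t' := by
    cases t with
    | nil => exact absurd rfl ht
    | cons a s => exact ⟨a, s, rfl⟩
  rw [PySem.List.max?_id_cons] at h
  rw [List.cons_append, PySem.List.max?_id_cons, List.foldl_append]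
  injection h with h
  rw [h]
  simp [List.foldl]

lemma pvWinners_append (t : List Int) (x b : Int) :
    pvWinners (t ++ [x]) b
      = pvWinners t b ++ (if x = b then [(0 + (t.length : Int))] else []) := by
  unfold pvWinners
  rw [PySem.List.enumerate_append, List.filter_append, List.map_append]
  congr 1
  by_cases hx : x = b <;> simp [PySem.List.enumerate, hx]

lemma pvInv (l : List Int) (hl : l ≠ []) :
    ∃ b w r,
      (PySem.List.enumerate l 0).foldl pvAltStep (none, -1, 0) = (some b, w, (1 + r.length : Int)) ∧
      PySem.List.max? l (fun y => y) = some b ∧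
      pvWinners l b = w :: r := by
  induction l using List.reverseRecOn with
  | nil => exact absurd rfl hl
  | append_singleton t x ih =>
    rcases eq_or_ne t [] with rfl | ht
    · refine ⟨x, 0, [], ?_, ?_, ?_⟩
      · simp [PySem.List.enumerate, pvAltStep]
      · simp [PySem.List.max?_id_cons]
      · simp [pvWinners, PySem.List.enumerate]
    · obtain ⟨b, w, r, hloop, hmax, hwin⟩ := ih ht
      have hstep : (PySem.List.enumerate (t ++ [x]) 0).foldl pvAltStep (none, -1, 0)
          = pvAltStep (some b, w, (1 + r.length : Int)) ((0 + (t.length : Int)), x) := by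
        rw [PySem.List.enumerate_append, List.foldl_append, hloop]
        simp [PySem.List.enumerate]
      rcases lt_trichotomy b x with hbx | hbx | hbx
      · -- x strictly greater: resets
        refine ⟨x, (0 + (t.length : Int)), [], ?_, ?_, ?_⟩
        · rw [hstep]; simp [pvAltStep, hbx]
        · rw [pvMax_append t ht x b hmax]; simp [max_eq_right hbx.le]
        · rw [pvWinners_append]
          have hnil : pvWinners t x = [] := by
            unfold pvWinners
            rw [List.filter_eq_nil_iff.2, List.map_nil]
            intro p hp
            obtain ⟨k, hk, rfl⟩ := (PySem.List.mem_enumerate_iff _ _ _).1 hp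
            have hle : t[k] ≤ b := by
              have := PySem.List.max?_isMax hmax t[k] (by exact List.getElem_mem hk)
              simpa using this
            simp only [beq_iff_eq]
            omega
          simp [hnil]
      · -- equal: count += 1
        refine ⟨b, w, r ++ [(0 + (t.length : Int))], ?_, ?_, ?_⟩
        · rw [hstep]
          simp [pvAltStep, hbx.symm]
          ring
        · rw [pvMax_append t ht x b hmax]; simp [hbx]
        · rw [pvWinners_append, hwin]
          simp [hbx.symm]
      · -- smaller: state unchanged
        refine ⟨b, w, r, ?_, ?_, ?_⟩
        · rw [hstep]
          have hne : ¬ (x = b) := by omega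
          simp [pvAltStep, not_lt.2 hbx.le, hne]
        · rw [pvMax_append t ht x b hmax]; simp [max_eq_left hbx.le]
        · rw [pvWinners_append, hwin]
          have hne : ¬ (x = b) := by omega
          simp [hne]

-- ===== VERDICT (by name: the statement is the Claim_ definition above) =====
theorem winner_index_from_payouts_py_spec : Claim_equal_winner_index_from_payouts_py := by
  intro payouts _
  unfold Spec_winner_index_from_payouts_py winner_index_from_payouts_py winner_index_from_payouts_py_alt
  rcases eq_or_ne payouts [] with rfl | hne
  · simp [PySem.List.enumerate]
  · obtain ⟨b, w, r, hloop, hmax, hwin⟩ := pvInv payouts hne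
    rw [hmax, hloop]
    simp only [hne, if_false]
    by_cases hb : b ≤ 0
    · simp [hb]
    · have hwinners : ((PySem.List.enumerate payouts 0).filter (fun p => p.2 == b)).map (fun p => p.1) = w :: r := hwin
      rw [hwinners]
      simp only [hb, if_false]
      rcases eq_or_ne r [] with rfl | hr
      · simp [PySem.List.pyGet?, PySem.List.pyIdx?]
      · have hr0 : r.length ≠ 0 := fun h => hr (List.length_eq_zero_iff.1 h)
        have h1 : ((w :: r).length == 1) = false := by
          simp only [beq_eq_false_iff_ne, ne_eq, List.length_cons]; omega
        have h2 : ((1 + (r.length : Int)) == 1) = false := by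
          simp only [beq_eq_false_iff_ne, ne_eq]; omega
        rw [h1, h2]
        simp
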